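-- pv_equiv track=rewrite | github.com/benny810/bass_dance | midi_to_dance/midi_parser.py | _build_tempo_map
-- ===== SOURCE A (Python) =====
-- from typing import List, Tuple
--
-- _DEFAULT_USPB = 500_000   # microseconds per beat (= 120 BPM)
--
-- def _build_tempo_map(events: List[Tuple[int, int]]) -> List[Tuple[int, int]]:
--     """Normalise a raw list of (tick, uspb) into a clean piecewise schedule.
--
--     The output is sorted by tick, deduplicated (later events override
--     earlier ones at the same tick), and guaranteed to start with an
--     entry at tick=0 so binary-search lookups always have a left anchor.
--     """
--     events = sorted(events, key=lambda e: e[0])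
--     cleaned: List[Tuple[int, int]] = []
--     seen_ticks: set = set()
--     for tick, uspb in events:
--         if tick in seen_ticks:
--             cleaned[-1] = (tick, uspb)
--         else:
--             cleaned.append((tick, uspb))
--             seen_ticks.add(tick)
--     if not cleaned or cleaned[0][0] != 0:
--         cleaned.insert(0, (0, cleaned[0][1] if cleaned else _DEFAULT_USPB))
--     return cleaned
-- ===== SOURCE B (Python) =====
-- _DEFAULT_USPB = 500_000   # microseconds per beat (= 120 BPM)
--
-- def _build_tempo_map(events):
--     """Collapse into a dict (last write per tick wins), then sort once by tick."""
--     last = {}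
--     for tick, uspb in events:
--         last[tick] = uspb
--     cleaned = sorted(last.items(), key=lambda e: e[0])
--     if not cleaned or cleaned[0][0] != 0:
--         cleaned.insert(0, (0, cleaned[0][1] if cleaned else _DEFAULT_USPB))
--     return cleaned
-- ===== Notes on version B (the rewrite author's own statement) =====
-- stated objective: simpler
-- what changed: Replaces A's sort-first + set-of-seen-ticks dedup loop with mutation of the list's last slot by a single dict-collapse pass over the ORIGINAL events (last write per tick wins) followed by one sort of the distinct items; the in-loop set membership test and the cleaned[-1] overwrite disappear.
import Mathlib
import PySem

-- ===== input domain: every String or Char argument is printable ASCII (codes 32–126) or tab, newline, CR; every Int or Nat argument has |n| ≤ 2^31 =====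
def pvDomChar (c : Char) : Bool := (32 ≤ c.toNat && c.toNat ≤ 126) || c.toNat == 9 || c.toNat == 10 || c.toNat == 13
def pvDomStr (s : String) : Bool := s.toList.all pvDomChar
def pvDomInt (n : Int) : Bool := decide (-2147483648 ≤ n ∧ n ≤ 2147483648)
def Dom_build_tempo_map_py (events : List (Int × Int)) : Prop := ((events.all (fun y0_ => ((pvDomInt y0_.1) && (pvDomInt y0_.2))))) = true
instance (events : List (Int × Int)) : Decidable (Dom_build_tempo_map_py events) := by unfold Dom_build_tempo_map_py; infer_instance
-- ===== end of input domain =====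

-- B collapses the events into a dict (last write per tick wins) and sorts its items once,
-- instead of A's up-front sort plus a seen-ticks-set dedup loop that overwrites cleaned[-1]; objective: simpler.

-- ===== PORT A =====
-- loop body: 'cleaned[-1] = (tick, uspb)' is dropLast ++ [e]; exact here because the branch
-- fires only when seen_ticks (= the ticks of cleaned) is nonempty, so cleaned is nonempty.
def pvStepA (acc : List (Int × Int) × PySem.Set Int) (e : Int × Int) :
    List (Int × Int) × PySem.Set Int :=
  if e.1 ∈ acc.2 then (acc.1.dropLast ++ [e], acc.2)
  else (acc.1 ++ [e], PySem.Set.add acc.2 e.1)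

def build_tempo_map_py (events : List (Int × Int)) : List (Int × Int) :=
  let evs := PySem.List.sorted events (fun e => e.1)
  let cleaned := (evs.foldl pvStepA ([], PySem.Set.empty)).1
  -- 'if not cleaned or cleaned[0][0] != 0: cleaned.insert(0, (0, cleaned[0][1] if cleaned else 500000))'
  match cleaned with
  | [] => [(0, 500000)]
  | (t, u) :: rest => if t ≠ 0 then (0, u) :: (t, u) :: rest else (t, u) :: rest

-- ===== PORT B =====
def build_tempo_map_py_alt (events : List (Int × Int)) : List (Int × Int) :=
  let d := events.foldl (fun d e => d.insert e.1 e.2) (PySem.Dict.empty : PySem.Dict Int Int)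
  let cleaned := PySem.List.sorted d.items (fun e => e.1)
  match cleaned with
  | [] => [(0, 500000)]
  | (t, u) :: rest => if t ≠ 0 then (0, u) :: (t, u) :: rest else (t, u) :: rest

-- ===== PRECONDITION & SPEC =====
def Spec_build_tempo_map_py (events : List (Int × Int)) (out : List (Int × Int)) : Prop := out = build_tempo_map_py_alt events
instance (events : List (Int × Int)) (out : List (Int × Int)) : Decidable (Spec_build_tempo_map_py events out) := by unfold Spec_build_tempo_map_py; infer_instance

-- ===== CLAIM (what is proved, stated in full; the proofs are below) =====
def Claim_equal_build_tempo_map_py : Prop := ∀ (events : List (Int × Int)), Dom_build_tempo_map_py events → Spec_build_tempo_map_py events (build_tempo_map_py events)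

-- ===== LEMMAS AND PROOFS =====

-- inserting into a key-sorted list keeps the key-k elements' order and puts x after them (stability of insertion)
lemma pv_filter_insertBy (k : Int) (x : Int × Int) (ys : List (Int × Int))
    (hs : ys.Pairwise (fun a b => a.1 ≤ b.1)) :
    (PySem.List.insertBy (fun a b => decide (a.1 < b.1)) x ys).filter (fun p => decide (p.1 = k))
      = ys.filter (fun p => decide (p.1 = k)) ++ [x].filter (fun p => decide (p.1 = k)) := by
  induction ys with
  | nil => simp [PySem.List.insertBy]
  | cons y ys ih =>
    rw [List.pairwise_cons] at hs
    rw [PySem.List.insertBy]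
    by_cases hlt : x.1 < y.1
    · simp only [hlt, decide_true, if_true]
      by_cases hk : x.1 = k
      · have hnil : (y :: ys).filter (fun p => decide (p.1 = k)) = [] := by
          rw [List.filter_eq_nil_iff]
          intro a ha
          have hya : y.1 ≤ a.1 := by
            rcases List.mem_cons.mp ha with h | h
            · exact h ▸ le_refl _
            · exact hs.1 a h
          simp only [decide_eq_true_eq]
          omega
        simp [hnil, hk]
      · simp [List.filter_cons, hk]
    · simp only [hlt, decide_false, Bool.false_eq_true, if_false]
      rw [List.filter_cons, List.filter_cons, ih hs.2]
      by_cases hy : y.1 = k <;> simp [hy]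

-- a stable sort on the tick key commutes with filtering one tick
lemma pv_sorted_filter (k : Int) (xs : List (Int × Int)) :
    (PySem.List.sorted xs (fun e => e.1)).filter (fun p => decide (p.1 = k))
      = xs.filter (fun p => decide (p.1 = k)) := by
  induction xs using List.reverseRecOn with
  | nil => simp [PySem.List.sorted]
  | append_singleton xs x ih =>
    have h1 : PySem.List.sorted (xs ++ [x]) (fun e => e.1)
        = PySem.List.insertBy (fun a b => decide (a.1 < b.1)) x
            (PySem.List.sorted xs (fun e => e.1)) := by
      rw [PySem.List.sorted_eq_foldl_insertBy, PySem.List.sorted_eq_foldl_insertBy,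
        List.foldl_append]
      rfl
    rw [h1, pv_filter_insertBy k x _ (PySem.List.sorted_pairwise xs (fun e => e.1)), ih,
      List.filter_append]

-- the dict built by the B loop answers each key with the LAST value written for it
lemma pv_get_foldl_insert (l : List (Int × Int)) (d : PySem.Dict Int Int) (k : Int) :
    (l.foldl (fun d e => d.insert e.1 e.2) d).get? k
      = ((l.filter (fun p => decide (p.1 = k))).getLast?.map Prod.snd).or (d.get? k) := by
  induction l generalizing d with
  | nil => simp
  | cons e l ih =>
    rw [List.foldl_cons, ih, List.filter_cons]
    by_cases hk : e.1 = k
    · simp only [hk, decide_true, if_true, List.getLast?_cons]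
      cases h : (l.filter (fun p => decide (p.1 = k))).getLast? with
      | some p => simp
      | none => simp
    · simp only [hk, decide_false, Bool.false_eq_true, if_false]
      rw [PySem.Dict.get?_insert_of_ne d e.2 (fun h => hk h.symm)]

-- invariant of A's dedup loop over a key-sorted remainder l from a strictly sorted prefix c
lemma pv_loopA (l : List (Int × Int)) (c : List (Int × Int))
    (h1 : c.Pairwise (fun a b => a.1 < b.1))
    (h2 : l.Pairwise (fun a b => a.1 ≤ b.1))
    (h3 : ∀ p ∈ c.dropLast, ∀ e ∈ l, p.1 < e.1)
    (h4 : ∀ p ∈ c.getLast?, ∀ e ∈ l, p.1 ≤ e.1) :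
    (l.foldl pvStepA (c, c.map Prod.fst)).1.Pairwise (fun a b => a.1 < b.1) ∧
    ∀ q : Int × Int, (q ∈ (l.foldl pvStepA (c, c.map Prod.fst)).1 ↔
      (match (l.filter (fun p => decide (p.1 = q.1))).getLast? with
       | some p => q = p
       | none => q ∈ c)) := by
  induction l generalizing c with
  | nil => exact ⟨h1, by intro q; simp⟩
  | cons e l ih =>
    rw [List.pairwise_cons] at h2
    rw [List.foldl_cons]
    by_cases hmem : e.1 ∈ c.map Prod.fst
    · -- overwrite branch: cleaned[-1] = e
      have hstep : pvStepA (c, c.map Prod.fst) e = (c.dropLast ++ [e], c.map Prod.fst) := by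
        simp [pvStepA, hmem]
      have hc : c ≠ [] := by rintro rfl; simp at hmem
      have hdl : c.dropLast ++ [c.getLast hc] = c := List.dropLast_concat_getLast hc
      have hlast1 : (c.getLast hc).1 = e.1 := by
        obtain ⟨p0, hp0c, hp0⟩ := List.mem_map.mp hmem
        rcases (List.mem_append.mp (hdl ▸ hp0c)) with h | h
        · exact absurd hp0 (ne_of_lt (h3 p0 h e List.mem_cons_self))
        · simp only [List.mem_singleton] at h; rw [← h, hp0]
      have hmapeq : (c.dropLast ++ [e]).map Prod.fst = c.map Prod.fst := by
        conv_rhs => rw [← hdl]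
        simp [hlast1]
      rw [hstep, ← hmapeq]
      have hdlp : ∀ p ∈ c.dropLast, p.1 < e.1 := fun p hp => h3 p hp e List.mem_cons_self
      have h1' : (c.dropLast ++ [e]).Pairwise (fun a b => a.1 < b.1) := by
        rw [List.pairwise_append]
        exact ⟨h1.sublist (List.dropLast_sublist c), List.pairwise_singleton _ _,
          fun a ha b hb => by rw [List.mem_singleton] at hb; subst hb; exact hdlp a ha⟩
      have h3' : ∀ p ∈ (c.dropLast ++ [e]).dropLast, ∀ f ∈ l, p.1 < f.1 := by
        rw [List.dropLast_concat]
        exact fun p hp f hf => h3 p hp f (List.mem_cons_of_mem _ hf)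
      have h4' : ∀ p ∈ (c.dropLast ++ [e]).getLast?, ∀ f ∈ l, p.1 ≤ f.1 := by
        rw [List.getLast?_concat]
        rintro p hp f hf
        rw [Option.mem_some_iff] at hp
        subst hp
        exact h2.1 f hf
      obtain ⟨ihp, ihm⟩ := ih (c.dropLast ++ [e]) h1' h2.2 h3' h4'
      refine ⟨ihp, fun q => ?_⟩
      rw [ihm q, List.filter_cons]
      by_cases hqe : e.1 = q.1
      · simp only [hqe, decide_true, if_pos, List.getLast?_cons]
        cases hfl : (l.filter (fun p => decide (p.1 = q.1))).getLast? with
        | some p => simp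
        | none =>
          simp only [Option.getD_none]
          constructor
          · intro hq
            rcases List.mem_append.mp hq with h | h
            · exact absurd hqe.symm (ne_of_lt (hdlp q h))
            · exact (List.mem_singleton.mp h)
          · rintro rfl; exact List.mem_append_right _ List.mem_cons_self
      · simp only [hqe, decide_false, Bool.false_eq_true, if_false]
        cases hfl : (l.filter (fun p => decide (p.1 = q.1))).getLast? with
        | some p => rfl
        | none =>
          show q ∈ c.dropLast ++ [e] ↔ q ∈ c
          conv_rhs => rw [← hdl]
          simp only [List.mem_append, List.mem_singleton]
          constructor
          · rintro (h | rfl)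
            · exact Or.inl h
            · exact absurd rfl hqe
          · rintro (h | rfl)
            · exact Or.inl h
            · exact absurd hlast1 (fun h => hqe h.symm)
    · -- fresh-tick branch: append
      have hstep : pvStepA (c, c.map Prod.fst) e = (c ++ [e], (c ++ [e]).map Prod.fst) := by
        simp [pvStepA, PySem.Set.add, hmem]
      rw [hstep]
      have hlt : ∀ p ∈ c, p.1 < e.1 := by
        intro p hp
        rcases List.mem_append.mp ((List.dropLast_concat_getLast (l := c) (by rintro rfl; simp at hp)) ▸ hp) with h | h
        · exact h3 p h e List.mem_cons_self
        · rw [List.mem_singleton] at h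
          refine lt_of_le_of_ne (h4 p ?_ e List.mem_cons_self) ?_
          · rw [List.getLast?_eq_some_getLast (by rintro rfl; simp at hp), Option.mem_some_iff]
            exact h.symm
          · intro hq; exact hmem (List.mem_map.mpr ⟨p, hp, hq⟩)
      have h1' : (c ++ [e]).Pairwise (fun a b => a.1 < b.1) := by
        rw [List.pairwise_append]
        exact ⟨h1, List.pairwise_singleton _ _,
          fun a ha b hb => by rw [List.mem_singleton] at hb; subst hb; exact hlt a ha⟩
      have h3' : ∀ p ∈ (c ++ [e]).dropLast, ∀ f ∈ l, p.1 < f.1 := by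
        rw [List.dropLast_concat]
        exact fun p hp f hf => lt_of_lt_of_le (hlt p hp) (h2.1 f hf)
      have h4' : ∀ p ∈ (c ++ [e]).getLast?, ∀ f ∈ l, p.1 ≤ f.1 := by
        rw [List.getLast?_concat]
        rintro p hp f hf
        rw [Option.mem_some_iff] at hp
        subst hp
        exact h2.1 f hf
      obtain ⟨ihp, ihm⟩ := ih (c ++ [e]) h1' h2.2 h3' h4'
      refine ⟨ihp, fun q => ?_⟩
      rw [ihm q, List.filter_cons]
      by_cases hqe : e.1 = q.1
      · simp only [hqe, decide_true, if_pos, List.getLast?_cons]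
        cases hfl : (l.filter (fun p => decide (p.1 = q.1))).getLast? with
        | some p => simp
        | none =>
          simp only [Option.getD_none]
          constructor
          · intro hq
            rcases List.mem_append.mp hq with h | h
            · exact absurd hqe.symm (ne_of_lt (hlt q h))
            · exact List.mem_singleton.mp h
          · rintro rfl; exact List.mem_append_right _ List.mem_cons_self
      · simp only [hqe, decide_false, Bool.false_eq_true, if_false]
        cases hfl : (l.filter (fun p => decide (p.1 = q.1))).getLast? with
        | some p => rfl
        | none =>
          show q ∈ c ++ [e] ↔ q ∈ c
          simp only [List.mem_append, List.mem_singleton]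
          constructor
          · rintro (h | rfl)
            · exact h
            · exact absurd rfl hqe
          · exact fun h => Or.inl h

-- the two cores coincide: A's dedup of the sorted events IS the sorted dict items
lemma pv_core_eq (events : List (Int × Int)) :
    PySem.List.sorted
        (events.foldl (fun d e => d.insert e.1 e.2) (PySem.Dict.empty : PySem.Dict Int Int)).items
        (fun e => e.1)
      = ((PySem.List.sorted events (fun e => e.1)).foldl pvStepA ([], ([] : PySem.Set Int))).1 := by
  show _ = (List.foldl pvStepA (([] : List (Int × Int)), ([] : PySem.Set Int))
    (PySem.List.sorted events (fun e => e.1))).1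
  have hloop := pv_loopA (PySem.List.sorted events (fun e => e.1)) []
    (List.Pairwise.nil) (PySem.List.sorted_pairwise events (fun e => e.1))
    (by simp) (by simp)
  simp only [List.map_nil] at hloop
  obtain ⟨hpair, hmem⟩ := hloop
  have hkeys : (events.foldl (fun d e => d.insert e.1 e.2)
      (PySem.Dict.empty : PySem.Dict Int Int)).keys.Nodup :=
    PySem.Dict.nodup_keys_foldl_insert_key events Prod.fst (fun _ e => e.2) PySem.Dict.empty
      (by simp)
  have hitems : (events.foldl (fun d e => d.insert e.1 e.2)
      (PySem.Dict.empty : PySem.Dict Int Int)).items.Nodup := hkeys.of_map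
  have hnodA : (((PySem.List.sorted events (fun e => e.1)).foldl pvStepA
      ([], ([] : PySem.Set Int))).1).Nodup :=
    hpair.imp (by rintro a b hab rfl; exact lt_irrefl _ hab)
  have hmemI : ∀ q : Int × Int,
      (q ∈ (events.foldl (fun d e => d.insert e.1 e.2)
        (PySem.Dict.empty : PySem.Dict Int Int)).items ↔
      (events.filter (fun p => decide (p.1 = q.1))).getLast?.map Prod.snd = some q.2) := by
    intro q
    have h := PySem.Dict.get?_eq_some_iff_mem_items
      (events.foldl (fun d e => d.insert e.1 e.2) (PySem.Dict.empty : PySem.Dict Int Int))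
      q.1 q.2 hkeys
    rw [pv_get_foldl_insert] at h
    simp only [PySem.Dict.get?_empty, Option.or_none] at h
    rw [← h]
  have hiff : ∀ q : Int × Int,
      q ∈ ((PySem.List.sorted events (fun e => e.1)).foldl pvStepA ([], ([] : PySem.Set Int))).1 ↔
      q ∈ (events.foldl (fun d e => d.insert e.1 e.2)
        (PySem.Dict.empty : PySem.Dict Int Int)).items := by
    intro q
    rw [hmem q, hmemI q, pv_sorted_filter q.1 events]
    cases hgl : (events.filter (fun p => decide (p.1 = q.1))).getLast? with
    | none => simp
    | some p =>
      have hp1 : p.1 = q.1 := by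
        simpa using (List.mem_filter.mp (List.mem_of_getLast? hgl)).2
      simp only [Option.map_some, Option.some.injEq]
      constructor
      · rintro rfl; rfl
      · intro h
        rw [Prod.ext_iff]
        exact ⟨hp1.symm, h.symm⟩
  have hperm : (((PySem.List.sorted events (fun e => e.1)).foldl pvStepA
      ([], ([] : PySem.Set Int))).1).Perm
      (events.foldl (fun d e => d.insert e.1 e.2)
        (PySem.Dict.empty : PySem.Dict Int Int)).items :=
    (List.perm_ext_iff_of_nodup hnodA hitems).mpr hiff
  exact PySem.List.sorted_eq_of_perm_of_pairwise_lt _ _ (fun e => e.1) hperm hpair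

-- ===== VERDICT (by name: the statement is the Claim_ definition above) =====
theorem build_tempo_map_py_spec : Claim_equal_build_tempo_map_py := by
  intro events _
  show build_tempo_map_py events = build_tempo_map_py_alt events
  simp only [build_tempo_map_py, build_tempo_map_py_alt, pv_core_eq]
  rfl
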